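-- pv_equiv track=rewrite | github.com/incliff/scraping_shunfeng_order | obtain_order_date.py | format_datetime
-- ===== SOURCE A (Python) =====
-- def format_datetime(between_seconds, accurate_unit=0):
--     if between_seconds == 0:
--         return ""
--
--     elif between_seconds < 60:
--         return "{} 秒 ".format(between_seconds)
--
--     elif 60 <= between_seconds < 3600:
--         return "{} 分 ".format(between_seconds // 60) + (
--             format_datetime(between_seconds % 60, accurate_unit) if accurate_unit < 1 else "")
--
--     elif 3600 <= between_seconds < 86400:
--         return "{} 小时 ".format(between_seconds // 3600) + (
--             format_datetime(between_seconds % 3600, accurate_unit) if accurate_unit < 2 else "")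
--
--     elif between_seconds >= 86400:
--         return "{} 天 ".format(between_seconds // 86400) + (
--             format_datetime(between_seconds % 86400, accurate_unit) if accurate_unit < 3 else "")
-- ===== SOURCE B (Python) =====
-- def format_datetime(between_seconds, accurate_unit=0):
--     value = between_seconds
--     parts = []
--     for threshold, name, level in ((86400, "天", 3), (3600, "小时", 2), (60, "分", 1)):
--         if value >= threshold:
--             parts.append("{} {} ".format(value // threshold, name))
--             value %= threshold
--             if accurate_unit >= level:
--                 break
--     else:
--         if value != 0:
--             parts.append("{} 秒 ".format(value))
--     return "".join(parts)
-- ===== Notes on version B (the rewrite author's own statement) =====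
-- stated objective: alternative
-- what changed: Replaced the four-branch self-recursion with a single iterative pass over a descending unit ladder [(86400,'天',3),(3600,'小时',2),(60,'分',1)] accumulating parts, with the accuracy cutoff as a loop break and the seconds piece appended in the for-else.
import Mathlib
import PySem

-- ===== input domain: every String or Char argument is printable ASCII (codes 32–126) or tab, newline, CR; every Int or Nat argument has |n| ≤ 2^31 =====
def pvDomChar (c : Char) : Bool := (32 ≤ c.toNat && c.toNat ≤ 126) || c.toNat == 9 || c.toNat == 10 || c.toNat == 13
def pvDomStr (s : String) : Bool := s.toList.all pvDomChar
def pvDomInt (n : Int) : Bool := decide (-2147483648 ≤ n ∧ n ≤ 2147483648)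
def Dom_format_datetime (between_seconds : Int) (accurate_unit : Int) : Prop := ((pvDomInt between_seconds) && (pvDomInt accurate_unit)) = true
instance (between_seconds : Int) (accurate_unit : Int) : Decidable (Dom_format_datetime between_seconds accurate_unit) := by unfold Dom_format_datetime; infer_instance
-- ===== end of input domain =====

-- B replaces A's four-branch self-recursion by one iterative pass over a descending
-- unit ladder with an accumulator (objective: alternative decomposition, same cost).

-- ===== PORT A =====
-- literal transliteration of A's recursion; "{} X ".format(n) = str(n) ++ " X "
def format_datetime (between_seconds : Int) (accurate_unit : Int) : String :=
  if between_seconds = 0 then ""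
  else if between_seconds < 60 then
    PySem.Int.toStr between_seconds ++ " 秒 "
  else if between_seconds < 3600 then
    PySem.Int.toStr (PySem.Int.floordiv between_seconds 60) ++ " 分 " ++
      (if accurate_unit < 1 then format_datetime (PySem.Int.mod between_seconds 60) accurate_unit else "")
  else if between_seconds < 86400 then
    PySem.Int.toStr (PySem.Int.floordiv between_seconds 3600) ++ " 小时 " ++
      (if accurate_unit < 2 then format_datetime (PySem.Int.mod between_seconds 3600) accurate_unit else "")
  else
    PySem.Int.toStr (PySem.Int.floordiv between_seconds 86400) ++ " 天 " ++
      (if accurate_unit < 3 then format_datetime (PySem.Int.mod between_seconds 86400) accurate_unit else "")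
termination_by between_seconds.toNat
decreasing_by
  · have h := PySem.Int.mod_eq_emod_of_pos (a := between_seconds) (b := 60) (by norm_num)
    have h1 := Int.emod_nonneg between_seconds (by norm_num : (60:Int) ≠ 0)
    have h2 := Int.emod_lt_of_pos between_seconds (by norm_num : (0:Int) < 60)
    omega
  · have h := PySem.Int.mod_eq_emod_of_pos (a := between_seconds) (b := 3600) (by norm_num)
    have h1 := Int.emod_nonneg between_seconds (by norm_num : (3600:Int) ≠ 0)
    have h2 := Int.emod_lt_of_pos between_seconds (by norm_num : (0:Int) < 3600)
    omega
  · have h := PySem.Int.mod_eq_emod_of_pos (a := between_seconds) (b := 86400) (by norm_num)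
    have h1 := Int.emod_nonneg between_seconds (by norm_num : (86400:Int) ≠ 0)
    have h2 := Int.emod_lt_of_pos between_seconds (by norm_num : (0:Int) < 86400)
    omega

-- ===== PORT B =====
-- the descending unit ladder (threshold, name, level) of Source B
def pvLadder : List (Int × String × Int) := [(86400, "天", 3), (3600, "小时", 2), (60, "分", 1)]

-- Source B's for-loop: returns (parts, value, broke); broke = true means the Python loop hit `break`
def pvLoop : List (Int × String × Int) → Int → Int → List String → List String × Int × Bool
  | [], v, _, parts => (parts, v, false)
  | (t, name, lvl) :: rest, v, a, parts =>
    if t ≤ v then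
      let parts' := parts ++ [PySem.Int.toStr (PySem.Int.floordiv v t) ++ " " ++ name ++ " "]
      let v' := PySem.Int.mod v t
      if lvl ≤ a then (parts', v', true) else pvLoop rest v' a parts'
    else pvLoop rest v a parts

def format_datetime_alt (between_seconds : Int) (accurate_unit : Int) : String :=
  let r := pvLoop pvLadder between_seconds accurate_unit []
  -- for-else: the seconds piece is appended only when the loop did not break and value ≠ 0
  String.join (if r.2.2 = false ∧ r.2.1 ≠ 0
               then r.1 ++ [PySem.Int.toStr r.2.1 ++ " 秒 "]
               else r.1)

-- ===== PRECONDITION & SPEC =====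
def Spec_format_datetime (between_seconds : Int) (accurate_unit : Int) (out : String) : Prop := out = format_datetime_alt between_seconds accurate_unit
instance (between_seconds : Int) (accurate_unit : Int) (out : String) : Decidable (Spec_format_datetime between_seconds accurate_unit out) := by unfold Spec_format_datetime; infer_instance

-- ===== CLAIM (what is proved, stated in full; the proofs are below) =====
def Claim_equal_format_datetime : Prop := ∀ (between_seconds : Int) (accurate_unit : Int), Dom_format_datetime between_seconds accurate_unit → Spec_format_datetime between_seconds accurate_unit (format_datetime between_seconds accurate_unit)

-- ===== LEMMAS AND PROOFS =====

-- B's loop run from a suffix of the ladder, finished by the for-else seconds clause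
def altOn (L : List (Int × String × Int)) (v a : Int) : String :=
  let r := pvLoop L v a []
  String.join (if r.2.2 = false ∧ r.2.1 ≠ 0
               then r.1 ++ [PySem.Int.toStr r.2.1 ++ " 秒 "]
               else r.1)

lemma alt_eq_altOn (b a : Int) : format_datetime_alt b a = altOn pvLadder b a := rfl

lemma str_foldl_append (l : List String) (s : String) :
    l.foldl (· ++ ·) s = s ++ l.foldl (· ++ ·) "" := by
  induction l generalizing s with
  | nil => simp
  | cons x xs ih =>
    simp only [List.foldl]
    rw [ih (s ++ x), ih ("" ++ x)]
    simp [String.append_assoc]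

lemma join_cons (s : String) (l : List String) :
    String.join (s :: l) = s ++ String.join l := by
  simp only [String.join, List.foldl]
  rw [str_foldl_append]
  simp

lemma pvLoop_acc (L : List (Int × String × Int)) (v a : Int) (xs : List String) :
    pvLoop L v a xs = (xs ++ (pvLoop L v a []).1, (pvLoop L v a []).2) := by
  induction L generalizing v xs with
  | nil => simp [pvLoop]
  | cons h rest ih =>
    obtain ⟨t, name, lvl⟩ := h
    simp only [pvLoop]
    split_ifs with h1 h2
    · simp
    · rw [ih _ (xs ++ _), ih _ ([] ++ _)]
      simp
    · rw [ih v xs]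

lemma altOn_skip (t : Int) (n : String) (lvl : Int) (L : List (Int × String × Int))
    (v a : Int) (h : ¬ t ≤ v) : altOn ((t, n, lvl) :: L) v a = altOn L v a := by
  simp [altOn, pvLoop, h]

lemma altOn_break (t : Int) (n : String) (lvl : Int) (L : List (Int × String × Int))
    (v a : Int) (h : t ≤ v) (ha : lvl ≤ a) :
    altOn ((t, n, lvl) :: L) v a =
      PySem.Int.toStr (PySem.Int.floordiv v t) ++ (" " ++ n ++ " ") := by
  simp [altOn, pvLoop, h, ha, String.join, String.append_assoc]

lemma altOn_cont (t : Int) (n : String) (lvl : Int) (L : List (Int × String × Int))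
    (v a : Int) (h : t ≤ v) (ha : ¬ lvl ≤ a) :
    altOn ((t, n, lvl) :: L) v a =
      PySem.Int.toStr (PySem.Int.floordiv v t) ++ ((" " ++ n ++ " ") ++ altOn L (PySem.Int.mod v t) a) := by
  have hacc := pvLoop_acc L (PySem.Int.mod v t) a
      ([PySem.Int.toStr (PySem.Int.floordiv v t) ++ " " ++ n ++ " "])
  simp only [altOn, pvLoop, if_pos h, if_neg ha, List.nil_append, hacc]
  split_ifs with hc
  · simp [join_cons, String.append_assoc]
  · simp [join_cons, String.append_assoc]

lemma altOn_nil (v a : Int) :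
    altOn [] v a = if v = 0 then "" else PySem.Int.toStr v ++ " 秒 " := by
  by_cases h : v = 0 <;> simp [altOn, pvLoop, h, String.join]

lemma mod_bounds (v t : Int) (ht : 0 < t) :
    0 ≤ PySem.Int.mod v t ∧ PySem.Int.mod v t < t := by
  rw [PySem.Int.mod_eq_emod_of_pos (a := v) (b := t) ht]
  exact ⟨Int.emod_nonneg v (by omega), Int.emod_lt_of_pos v ht⟩

lemma keyNil (v a : Int) (hv : v < 60) : format_datetime v a = altOn [] v a := by
  rw [format_datetime.eq_def, altOn_nil]
  by_cases h : v = 0 <;> simp [h, hv]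

lemma key60 (v a : Int) (hv : v < 3600) :
    format_datetime v a = altOn [(60, "分", 1)] v a := by
  by_cases h1 : v < 60
  · rw [altOn_skip _ _ _ _ _ _ (by omega)]
    exact keyNil v a h1
  · have h0 : ¬ v = 0 := by omega
    have hmod := mod_bounds v 60 (by norm_num)
    have hn : ((" " : String) ++ "分" ++ " ") = " 分 " := rfl
    rw [format_datetime.eq_def, if_neg h0, if_neg h1, if_pos hv]
    by_cases ha : a < 1
    · rw [if_pos ha, altOn_cont _ _ _ _ _ _ (by omega) (by omega), keyNil _ a (by omega), hn,
        String.append_assoc]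
    · rw [if_neg ha, altOn_break _ _ _ _ _ _ (by omega) (by omega), hn]
      simp

lemma key3600 (v a : Int) (hv : v < 86400) :
    format_datetime v a = altOn [(3600, "小时", 2), (60, "分", 1)] v a := by
  by_cases h1 : v < 3600
  · rw [altOn_skip _ _ _ _ _ _ (by omega)]
    exact key60 v a h1
  · have h0 : ¬ v = 0 := by omega
    have h2 : ¬ v < 60 := by omega
    have hmod := mod_bounds v 3600 (by norm_num)
    have hn : ((" " : String) ++ "小时" ++ " ") = " 小时 " := rfl
    rw [format_datetime.eq_def, if_neg h0, if_neg h2, if_neg h1, if_pos hv]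
    by_cases ha : a < 2
    · rw [if_pos ha, altOn_cont _ _ _ _ _ _ (by omega) (by omega), key60 _ a (by omega), hn,
        String.append_assoc]
    · rw [if_neg ha, altOn_break _ _ _ _ _ _ (by omega) (by omega), hn]
      simp

lemma key_main (v a : Int) : format_datetime v a = altOn pvLadder v a := by
  show format_datetime v a = altOn ((86400, "天", 3) :: [(3600, "小时", 2), (60, "分", 1)]) v a
  by_cases h1 : v < 86400
  · rw [altOn_skip _ _ _ _ _ _ (by omega)]
    exact key3600 v a h1
  · have h0 : ¬ v = 0 := by omega
    have h2 : ¬ v < 60 := by omega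
    have h3 : ¬ v < 3600 := by omega
    have hmod := mod_bounds v 86400 (by norm_num)
    have hn : ((" " : String) ++ "天" ++ " ") = " 天 " := rfl
    rw [format_datetime.eq_def, if_neg h0, if_neg h2, if_neg h3, if_neg h1]
    by_cases ha : a < 3
    · rw [if_pos ha, altOn_cont _ _ _ _ _ _ (by omega) (by omega), key3600 _ a (by omega), hn,
        String.append_assoc]
    · rw [if_neg ha, altOn_break _ _ _ _ _ _ (by omega) (by omega), hn]
      simp

-- ===== VERDICT (by name: the statement is the Claim_ definition above) =====
theorem format_datetime_spec : Claim_equal_format_datetime := by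
  intro b a _
  show _ = _
  rw [alt_eq_altOn, key_main]
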